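-- pv_equiv track=rewrite | github.com/zibneuro/udvary-et-al-2022 | structural_model/util_filter.py | filterLayer
-- ===== SOURCE A (Python) =====
-- def filterLayer(neurons, neuronsLayer, layers):
--     if(neuronsLayer is None):
--         ValueError(neuronsLayer)
--     nidsAll = set(neurons.keys())
--
--     nidsSelected = set()
--     for layer in layers:
--         nidsSelected |= neuronsLayer[layer]
--     return nidsAll & nidsSelected
-- ===== SOURCE B (Python) =====
-- def filterLayer(neurons, neuronsLayer, layers):
--     # Inverted traversal: materialise the selected layer sets (same dict
--     # accesses, hence same KeyError behaviour as A), then keep each neuron id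
--     # that is a member of any of them -- no union set is ever built.
--     sets = [neuronsLayer[layer] for layer in layers]
--     return {nid for nid in neurons if any(nid in s for s in sets)}
-- ===== Notes on version B (the rewrite author's own statement) =====
-- stated objective: alternative
-- what changed: A accumulates the union of the selected layer sets and intersects it with the neuron-key set; B inverts the traversal: it materialises the selected layer sets and builds the result by iterating over the neuron keys, keeping those contained in any layer set, so no union set is ever constructed.
import Mathlib
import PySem

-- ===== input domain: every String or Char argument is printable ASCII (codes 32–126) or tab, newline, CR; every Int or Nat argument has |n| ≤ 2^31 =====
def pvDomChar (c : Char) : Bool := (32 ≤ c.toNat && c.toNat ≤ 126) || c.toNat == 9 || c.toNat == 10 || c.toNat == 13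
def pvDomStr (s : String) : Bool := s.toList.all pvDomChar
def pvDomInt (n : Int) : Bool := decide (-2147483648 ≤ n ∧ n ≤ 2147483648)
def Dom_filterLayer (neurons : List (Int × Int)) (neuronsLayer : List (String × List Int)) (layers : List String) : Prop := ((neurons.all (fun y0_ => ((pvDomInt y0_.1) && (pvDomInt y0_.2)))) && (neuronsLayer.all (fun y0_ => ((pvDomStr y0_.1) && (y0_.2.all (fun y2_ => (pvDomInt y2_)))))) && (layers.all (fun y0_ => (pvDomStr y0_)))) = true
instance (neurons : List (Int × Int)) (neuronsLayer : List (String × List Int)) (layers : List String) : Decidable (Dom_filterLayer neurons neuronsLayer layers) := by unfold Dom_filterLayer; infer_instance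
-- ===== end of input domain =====

-- B inverts A's traversal: instead of accumulating the union of the selected layer
-- sets and intersecting, it filters the neuron keys by membership in any layer set
-- (objective: alternative decomposition, similar cost).

-- ===== PORT A =====
def filterLayer (neurons : List (Int × Int)) (neuronsLayer : List (String × List Int)) (layers : List String) : List Int :=
  let dL := PySem.Dict.ofList neuronsLayer
  let nidsAll : PySem.Set Int := PySem.Set.ofList (PySem.Dict.ofList neurons).keys
  let nidsSelected : PySem.Set Int :=
    layers.foldl (fun acc layer => PySem.Set.union acc ((dL.get? layer).getD [])) PySem.Set.empty
  PySem.Set.inter nidsAll nidsSelected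

-- ===== PORT B =====
def filterLayer_alt (neurons : List (Int × Int)) (neuronsLayer : List (String × List Int)) (layers : List String) : List Int :=
  let dL := PySem.Dict.ofList neuronsLayer
  let sets : List (List Int) := layers.map (fun layer => (dL.get? layer).getD [])
  PySem.Set.ofList
    (((PySem.Dict.ofList neurons).keys).filter
      (fun nid => sets.any (fun s => PySem.Set.contains s nid)))

-- ===== PRECONDITION & SPEC =====
-- Pre_ excludes exactly the inputs where Python A raises KeyError: some requested
-- layer is not a key of neuronsLayer (B raises there too).
def Pre_filterLayer (neurons : List (Int × Int)) (neuronsLayer : List (String × List Int)) (layers : List String) : Prop :=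
  ∀ l ∈ layers, l ∈ neuronsLayer.map Prod.fst
instance (neurons : List (Int × Int)) (neuronsLayer : List (String × List Int)) (layers : List String) : Decidable (Pre_filterLayer neurons neuronsLayer layers) := by unfold Pre_filterLayer; infer_instance
def pvWitness_filterLayer : (List (Int × Int)) × (List (String × List Int)) × List String :=
  ([(1, 0), (2, 0), (3, 0)], [("L1", [1, 4]), ("L2", [3])], ["L1", "L2"])

def Spec_filterLayer (neurons : List (Int × Int)) (neuronsLayer : List (String × List Int)) (layers : List String) (out : List Int) : Prop := out = filterLayer_alt neurons neuronsLayer layers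
instance (neurons : List (Int × Int)) (neuronsLayer : List (String × List Int)) (layers : List String) (out : List Int) : Decidable (Spec_filterLayer neurons neuronsLayer layers out) := by unfold Spec_filterLayer; infer_instance

-- ===== CLAIM (what is proved, stated in full; the proofs are below) =====
def Claim_equal_filterLayer : Prop := ∀ (neurons : List (Int × Int)) (neuronsLayer : List (String × List Int)) (layers : List String), Dom_filterLayer neurons neuronsLayer layers → Pre_filterLayer neurons neuronsLayer layers → Spec_filterLayer neurons neuronsLayer layers (filterLayer neurons neuronsLayer layers)

-- ===== LEMMAS AND PROOFS =====

-- membership in A's accumulated union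
theorem mem_foldl_union {α β : Type} [BEq α] [LawfulBEq α] (g : β → List α)
    (l : List β) (s : PySem.Set α) (y : α) :
    y ∈ l.foldl (fun acc x => PySem.Set.union acc (g x)) s ↔ y ∈ s ∨ ∃ x ∈ l, y ∈ g x := by
  induction l generalizing s with
  | nil => simp
  | cons b t ih =>
      simp only [List.foldl_cons, ih, PySem.Set.mem_union, List.mem_cons]
      constructor
      · rintro (⟨h | h⟩ | ⟨x, hx, hy⟩)
        · exact Or.inl h
        · exact Or.inr ⟨b, Or.inl rfl, h⟩
        · exact Or.inr ⟨x, Or.inr hx, hy⟩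
      · rintro (h | ⟨x, (rfl | hx), hy⟩)
        · exact Or.inl (Or.inl h)
        · exact Or.inl (Or.inr hy)
        · exact Or.inr ⟨x, hx, hy⟩

-- ===== VERDICT (by name: the statement is the Claim_ definition above) =====
theorem filterLayer_spec : Claim_equal_filterLayer := by
  intro neurons neuronsLayer layers _ _
  unfold Spec_filterLayer filterLayer filterLayer_alt
  dsimp only
  have hnd : (PySem.Dict.ofList neurons).keys.Nodup := PySem.Dict.nodup_keys_ofList neurons
  rw [PySem.Set.ofList_eq_self_of_nodup _ hnd,
      PySem.Set.ofList_eq_self_of_nodup _ (List.Nodup.filter _ hnd)]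
  show PySem.Set.inter _ _ = _
  unfold PySem.Set.inter
  apply List.filter_congr
  intro x _
  rw [Bool.eq_iff_iff]
  simp [mem_foldl_union, PySem.Set.contains_eq_listContains]
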